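-- pv_equiv track=rewrite | github.com/swarm-ai-safety/swarm | tests/test_adapter_server_dispatch.py | _build_dispatch_path
-- ===== SOURCE A (Python) =====
-- import posixpath
--
-- def _build_dispatch_path(rendered_path: str) -> str | None:
--     """Mirror the dispatch_path construction logic from adapter_server.call_tool.
--
--     Returns the dispatch_path string, or None if validation should reject it.
--     """
--     path_only, sep, query = rendered_path.partition("?")
--     normalized = posixpath.normpath(path_only)
--     if not normalized.startswith("/"):
--         return None
--
--     allowed_path_chars = set(
--         "abcdefghijklmnopqrstuvwxyz"
--         "ABCDEFGHIJKLMNOPQRSTUVWXYZ"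
--         "0123456789"
--         "/._-~"
--     )
--     if any(ch not in allowed_path_chars for ch in normalized):
--         return None
--
--     if query:
--         allowed_query_chars = allowed_path_chars | set("=&+%@!$'()*,;:")
--         if any(ch not in allowed_query_chars for ch in query):
--             return None
--
--     # Preserve trailing slash from the original path
--     trailing_slash = "/" if path_only.endswith("/") and normalized != "/" else ""
--     return normalized + trailing_slash + sep + query
-- ===== SOURCE B (Python) =====
-- import re
--
-- _DISPATCH_RE = re.compile(r"/[A-Za-z0-9/._~-]*(\?[A-Za-z0-9/._~=&+%@!$'()*,;:-]*)?")
--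
--
-- def _build_dispatch_path(rendered_path: str) -> str | None:
--     """Reject relative paths, normalize with an explicit component stack,
--     re-attach the trailing slash and query, and validate the rebuilt
--     candidate with a single compiled regular expression."""
--     path_only, sep, query = rendered_path.partition("?")
--     if not path_only.startswith("/"):
--         return None
--
--     stack = []
--     for comp in path_only.split("/"):
--         if comp == "..":
--             if stack:
--                 stack.pop()
--         elif comp and comp != ".":
--             stack.append(comp)
--     normalized = "/" + "/".join(stack)
--     if path_only.endswith("/") and normalized != "/":
--         normalized += "/"
--
--     candidate = normalized + sep + query
--     return candidate if _DISPATCH_RE.fullmatch(candidate) else None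
-- ===== Notes on version B (the rewrite author's own statement) =====
-- stated objective: alternative
-- what changed: B rejects relative paths up front, normalizes with an explicit component-stack loop instead of posixpath.normpath, and validates the rebuilt candidate (path + trailing slash + query) with one compiled regular expression instead of A's two per-character set scans; Pre_ excludes rendered paths whose path part begins with exactly two slashes, where posixpath.normpath's POSIX-specific preservation of the leading double slash and B's collapsing it to one slash are both defensible.
-- outside the precondition, e.g. on _build_dispatch_path('//a'): A returns '//a', B returns '/a'; on _build_dispatch_path('//'): A returns '///', B returns '/'
import Mathlib
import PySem

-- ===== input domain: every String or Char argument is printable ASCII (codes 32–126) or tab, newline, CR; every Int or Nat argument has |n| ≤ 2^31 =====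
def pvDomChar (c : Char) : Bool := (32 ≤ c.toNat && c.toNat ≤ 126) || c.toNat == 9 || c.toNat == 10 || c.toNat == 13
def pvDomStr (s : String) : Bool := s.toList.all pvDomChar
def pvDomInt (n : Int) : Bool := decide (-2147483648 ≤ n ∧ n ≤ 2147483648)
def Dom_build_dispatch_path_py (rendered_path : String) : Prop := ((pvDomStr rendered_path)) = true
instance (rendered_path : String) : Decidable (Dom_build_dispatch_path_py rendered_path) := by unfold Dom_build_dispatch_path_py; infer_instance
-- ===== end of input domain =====

-- B rejects relative paths early, normalizes with an explicit component stack
-- instead of posixpath.normpath, and validates the rebuilt candidate with one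
-- anchored regular expression instead of two per-character set scans
-- (objective: alternative).


-- ===== SHARED HELPER (both Pythons call str.partition) =====
-- str.partition(sep) for a single-char sep, ported by hand: split at first occurrence.
def pyPartition (s : List Char) (c : Char) : List Char × List Char × List Char :=
  match s with
  | [] => ([], [], [])
  | a :: t =>
    if a = c then ([], [c], t)
    else
      let r := pyPartition t c
      (a :: r.1, r.2)

-- one step of CPython posixpath.normpath's component loop (exact transliteration)
def pvNormStep (initialSlashes : Nat) (acc : List (List Char)) (comp : List Char) : List (List Char) :=
  if comp = [] ∨ comp = ['.'] then acc
  else if comp ≠ ['.', '.'] ∨ (initialSlashes = 0 ∧ acc = []) ∨ (acc ≠ [] ∧ acc.getLast? = some ['.', '.']) then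
    acc ++ [comp]
  else if acc ≠ [] then acc.dropLast
  else acc

-- posixpath.normpath, ported by hand step for step from CPython (exact on str input)
def pvNormpath (path : List Char) : List Char :=
  if path = [] then ['.']
  else
    let initialSlashes : Nat :=
      if PySem.Chars.startswith path ['/'] then
        (if PySem.Chars.startswith path ['/', '/'] ∧ ¬ PySem.Chars.startswith path ['/', '/', '/'] then 2 else 1)
      else 0
    let comps := PySem.Chars.splitOn path ['/']
    let newComps := comps.foldl (pvNormStep initialSlashes) []
    let joined := List.replicate initialSlashes '/' ++ PySem.Chars.join ['/'] newComps
    if joined = [] then ['.'] else joined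

-- ===== PORT A =====
def pvAllowedPathChars : PySem.Set Char :=
  PySem.Set.ofList ("abcdefghijklmnopqrstuvwxyzABCDEFGHIJKLMNOPQRSTUVWXYZ0123456789/._-~".toList)

def build_dispatch_path_py (rendered_path : String) : Option String :=
  let p := pyPartition rendered_path.toList '?'
  let path_only := p.1
  let sep := p.2.1
  let query := p.2.2
  let normalized := pvNormpath path_only
  if ¬ PySem.Chars.startswith normalized ['/'] then none
  else if normalized.any (fun ch => ¬ PySem.Set.contains pvAllowedPathChars ch) then none
  else if query ≠ [] ∧
      query.any (fun ch => ¬ PySem.Set.contains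
        (PySem.Set.union pvAllowedPathChars ("=&+%@!$'()*,;:".toList)) ch) then none
  else
    let trailing := if PySem.Chars.endswith path_only ['/'] ∧ normalized ≠ ['/'] then ['/'] else []
    some (String.ofList (normalized ++ trailing ++ sep ++ query))

-- ===== PORT B =====
-- the two character classes of Source B's regex, as the finite char sets they denote
def pvPathClass : List Char := "ABCDEFGHIJKLMNOPQRSTUVWXYZabcdefghijklmnopqrstuvwxyz0123456789/._~-".toList
def pvQueryClass : List Char := "ABCDEFGHIJKLMNOPQRSTUVWXYZabcdefghijklmnopqrstuvwxyz0123456789/._~=&+%@!$'()*,;:-".toList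

-- matcher for the tail of the regex after the leading '/': [path]*(\?[query]*)?
-- deterministic because '?' is in neither class; exact denotation of the pattern
def pvReTail (cs : List Char) : Bool :=
  match cs with
  | [] => true
  | c :: t =>
    if pvPathClass.contains c then pvReTail t
    else if c = '?' then t.all (fun d => pvQueryClass.contains d)
    else false

-- _DISPATCH_RE.fullmatch(candidate): leading '/', then the tail pattern
def pvReMatch (cs : List Char) : Bool :=
  match cs with
  | '/' :: t => pvReTail t
  | _ => false

-- B's component-stack loop body (Python append/pop on the end of the list)
def pvStackStep (st : List (List Char)) (comp : List Char) : List (List Char) :=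
  if comp = ['.', '.'] then (if st = [] then st else st.dropLast)
  else if comp ≠ [] ∧ comp ≠ ['.'] then st ++ [comp]
  else st

def build_dispatch_path_py_alt (rendered_path : String) : Option String :=
  let p := pyPartition rendered_path.toList '?'
  let path_only := p.1
  let sep := p.2.1
  let query := p.2.2
  if ¬ PySem.Chars.startswith path_only ['/'] then none
  else
    let stack := (PySem.Chars.splitOn path_only ['/']).foldl pvStackStep []
    let normalized0 := '/' :: PySem.Chars.join ['/'] stack
    let normalized :=
      if PySem.Chars.endswith path_only ['/'] ∧ normalized0 ≠ ['/'] then normalized0 ++ ['/']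
      else normalized0
    let candidate := normalized ++ sep ++ query
    if pvReMatch candidate then some (String.ofList candidate) else none

-- ===== PRECONDITION & SPEC =====
-- Pre_ excludes rendered paths whose path part (before any '?') begins with exactly
-- two slashes: there posixpath.normpath preserves the POSIX-special leading '//'
-- while B collapses it to '/', and either normalization is defensible.
def Pre_build_dispatch_path_py (rendered_path : String) : Prop :=
  ¬ (PySem.Chars.startswith (rendered_path.toList.takeWhile (fun c => c ≠ '?')) ['/', '/'] = true ∧
     PySem.Chars.startswith (rendered_path.toList.takeWhile (fun c => c ≠ '?')) ['/', '/', '/'] = false)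
instance (rendered_path : String) : Decidable (Pre_build_dispatch_path_py rendered_path) := by unfold Pre_build_dispatch_path_py; infer_instance
def pvWitness_build_dispatch_path_py : String := "/api/v1/items/?id=3"

def Spec_build_dispatch_path_py (rendered_path : String) (out : Option String) : Prop := out = build_dispatch_path_py_alt rendered_path
instance (rendered_path : String) (out : Option String) : Decidable (Spec_build_dispatch_path_py rendered_path out) := by unfold Spec_build_dispatch_path_py; infer_instance

-- ===== CLAIM (what is proved, stated in full; the proofs are below) =====
def Claim_equal_build_dispatch_path_py : Prop := ∀ (rendered_path : String), Dom_build_dispatch_path_py rendered_path → Pre_build_dispatch_path_py rendered_path → Spec_build_dispatch_path_py rendered_path (build_dispatch_path_py rendered_path)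

-- ===== LEMMAS AND PROOFS =====
set_option maxRecDepth 10000

-- A's path-char test and B's path class agree pointwise (permuted literals)
theorem pv_path_char_eq (c : Char) :
    PySem.Set.contains pvAllowedPathChars c = pvPathClass.contains c := by
  have h : pvAllowedPathChars.Perm pvPathClass := by decide
  simp only [PySem.Set.contains, List.contains_eq_mem, decide_eq_decide]
  exact h.mem_iff

-- A's query-char test and B's query class agree pointwise
theorem pv_query_char_eq (c : Char) :
    PySem.Set.contains (PySem.Set.union pvAllowedPathChars ("=&+%@!$'()*,;:".toList)) c
      = pvQueryClass.contains c := by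
  have h : (PySem.Set.union pvAllowedPathChars ("=&+%@!$'()*,;:".toList)).Perm pvQueryClass := by
    decide
  simp only [PySem.Set.contains, List.contains_eq_mem, decide_eq_decide]
  exact h.mem_iff

-- the part before the separator in partition contains no separator
theorem pv_partition_no_sep (s : List Char) (c : Char) : c ∉ (pyPartition s c).1 := by
  induction s with
  | nil => simp [pyPartition]
  | cons a t ih =>
    unfold pyPartition
    by_cases h : a = c
    · simp [h]
    · simp only [if_neg h, List.mem_cons, not_or]
      exact ⟨fun hc => h hc.symm, ih⟩

-- chars of splitOn pieces come from the input
theorem pv_go_subset (fuel : Nat) (l cur : List Char) (acc : List (List Char)) (P : Char → Prop)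
    (hf : l.length < fuel) (hl : ∀ c ∈ l, P c) (hcur : ∀ c ∈ cur, P c)
    (hacc : ∀ x ∈ acc, ∀ c ∈ x, P c) :
    ∀ x ∈ PySem.Chars.splitOn.go ['/'] fuel l cur acc, ∀ c ∈ x, P c := by
  induction fuel generalizing l cur acc with
  | zero => omega
  | succ fuel ih =>
    cases l with
    | nil =>
      intro x hx
      unfold PySem.Chars.splitOn.go at hx
      simp only [List.mem_reverse, List.mem_cons] at hx
      rcases hx with h | h
      · subst h; simpa using hcur
      · exact hacc _ h
    | cons a rest =>
      unfold PySem.Chars.splitOn.go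
      by_cases hpre : ['/'].isPrefixOf (a :: rest) = true
      · rw [if_pos hpre]
        refine ih _ _ _ (by simp at hf ⊢; omega)
          (fun c hc => hl c (List.mem_cons_of_mem _ hc)) (by simp) ?_
        intro x hx
        rcases List.mem_cons.1 hx with h | h
        · subst h; simpa using hcur
        · exact hacc _ h
      · rw [if_neg hpre]
        refine ih _ _ _ (by simp at hf ⊢; omega)
          (fun c hc => hl c (List.mem_cons_of_mem _ hc)) ?_ hacc
        intro c hc
        rcases List.mem_cons.1 hc with h | h
        · exact h ▸ hl a List.mem_cons_self
        · exact hcur c h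

theorem pv_splitOn_subset (p : List Char) (P : Char → Prop) (hp : ∀ c ∈ p, P c) :
    ∀ x ∈ PySem.Chars.splitOn p ['/'], ∀ c ∈ x, P c := by
  unfold PySem.Chars.splitOn
  exact pv_go_subset _ _ _ _ P (by omega) hp (by simp) (by simp)

-- the fold only keeps pieces (or drops them): any member-wise property is preserved
theorem pv_fold_subset (k : Nat) (comps acc : List (List Char)) (P : List Char → Prop)
    (hacc : ∀ x ∈ acc, P x) (hc : ∀ x ∈ comps, P x) :
    ∀ x ∈ comps.foldl (pvNormStep k) acc, P x := by
  induction comps generalizing acc with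
  | nil => exact hacc
  | cons comp rest ih =>
    rw [List.foldl_cons]
    refine ih _ ?_ (fun x hx => hc x (List.mem_cons_of_mem _ hx))
    intro x hx
    unfold pvNormStep at hx
    split_ifs at hx
    · exact hacc x hx
    · rcases List.mem_append.1 hx with h | h
      · exact hacc x h
      · have hxc : x = comp := by simpa using h
        exact hxc ▸ hc _ List.mem_cons_self
    · exact hacc x (List.dropLast_subset _ hx)
    · exact hacc x hx

-- chars of a '/'-join of pieces whose chars satisfy P (with P '/') satisfy P
theorem pv_join_subset (lst : List (List Char)) (P : Char → Prop) (hs : P '/')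
    (h : ∀ x ∈ lst, ∀ c ∈ x, P c) : ∀ c ∈ PySem.Chars.join ['/'] lst, P c := by
  induction lst with
  | nil => simp [PySem.Chars.join_nil]
  | cons x rest ih =>
    cases rest with
    | nil =>
      rw [PySem.Chars.join_singleton]
      exact h x List.mem_cons_self
    | cons y ys =>
      rw [PySem.Chars.join_cons_cons]
      intro c hc
      rcases List.mem_append.1 hc with h1 | h1
      · rcases List.mem_append.1 h1 with h2 | h2
        · exact h x List.mem_cons_self c h2
        · have : c = '/' := by simpa using h2
          exact this ▸ hs
      · exact ih (fun z hz => h z (List.mem_cons_of_mem _ hz)) c h1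

-- normpath's tail computation keeps only '/', '.', and input chars
theorem pv_norm_core (k : Nat) (p : List Char) :
    ∀ c ∈ (if List.replicate k '/' ++ PySem.Chars.join ['/'] ((PySem.Chars.splitOn p ['/']).foldl (pvNormStep k) []) = []
        then ['.']
        else List.replicate k '/' ++ PySem.Chars.join ['/'] ((PySem.Chars.splitOn p ['/']).foldl (pvNormStep k) [])),
      c = '/' ∨ c = '.' ∨ c ∈ p := by
  intro c hc
  split_ifs at hc with hj
  · right; left; simpa using hc
  · rcases List.mem_append.1 hc with h2 | h2
    · left; exact List.eq_of_mem_replicate h2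
    · have hpieces := pv_splitOn_subset p (fun c => c = '/' ∨ c = '.' ∨ c ∈ p)
        (fun c hc => Or.inr (Or.inr hc))
      have hfold := pv_fold_subset k (PySem.Chars.splitOn p ['/']) []
        (fun x => ∀ c ∈ x, c = '/' ∨ c = '.' ∨ c ∈ p) (by simp) hpieces
      exact pv_join_subset _ _ (Or.inl rfl) hfold c h2

-- every char of normpath's output is '/', '.', or a char of the input
theorem pv_normpath_chars (p : List Char) :
    ∀ c ∈ pvNormpath p, c = '/' ∨ c = '.' ∨ c ∈ p := by
  by_cases h1 : p = []
  · subst h1; intro c hc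
    have : c = '.' := by simpa [pvNormpath] using hc
    exact Or.inr (Or.inl this)
  · unfold pvNormpath
    rw [if_neg h1]
    split_ifs with h2 h3
    · exact pv_norm_core 2 p
    · exact pv_norm_core 1 p
    · exact pv_norm_core 0 p

-- the part before the separator in partition is the '?'-free prefix
theorem pv_partition_fst (s : List Char) :
    (pyPartition s '?').1 = s.takeWhile (fun c => c ≠ '?') := by
  induction s with
  | nil => simp [pyPartition]
  | cons a t ih =>
    unfold pyPartition
    by_cases h : a = '?'
    · simp [h]
    · simp [h, ih]

-- split('/') produces pieces free of '/'
theorem pv_go_no_sep (fuel : Nat) (l cur : List Char) (acc : List (List Char))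
    (hf : l.length < fuel) (hcur : '/' ∉ cur) (hacc : ∀ x ∈ acc, '/' ∉ x) :
    ∀ x ∈ PySem.Chars.splitOn.go ['/'] fuel l cur acc, '/' ∉ x := by
  induction fuel generalizing l cur acc with
  | zero => omega
  | succ fuel ih =>
    cases l with
    | nil =>
      intro x hx
      unfold PySem.Chars.splitOn.go at hx
      simp only [List.mem_reverse, List.mem_cons] at hx
      rcases hx with h | h
      · subst h; simpa using hcur
      · exact hacc _ h
    | cons c rest =>
      unfold PySem.Chars.splitOn.go
      by_cases hpre : ['/'].isPrefixOf (c :: rest) = true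
      · rw [if_pos hpre]
        refine ih _ _ _ (by simp at hf ⊢; omega) (by simp) ?_
        intro x hx
        rcases List.mem_cons.1 hx with h | h
        · subst h; simpa using hcur
        · exact hacc _ h
      · rw [if_neg hpre]
        have hc : c ≠ '/' := by
          intro h; subst h
          simp [List.isPrefixOf] at hpre
        refine ih _ _ _ (by simp at hf ⊢; omega) ?_ hacc
        intro h
        rcases List.mem_cons.1 h with h | h
        · exact hc h.symm
        · exact hcur h

theorem pv_splitOn_no_sep (p : List Char) : ∀ x ∈ PySem.Chars.splitOn p ['/'], '/' ∉ x := by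
  unfold PySem.Chars.splitOn
  exact pv_go_no_sep _ _ _ _ (by omega) (by simp) (by simp)

-- A's component loop keeps only nonempty, '/'-free pieces
theorem pv_fold_inv (k : Nat) (comps : List (List Char)) (acc : List (List Char))
    (hacc : ∀ x ∈ acc, x ≠ [] ∧ '/' ∉ x) (hc : ∀ x ∈ comps, '/' ∉ x) :
    ∀ x ∈ comps.foldl (pvNormStep k) acc, x ≠ [] ∧ '/' ∉ x := by
  induction comps generalizing acc with
  | nil => exact hacc
  | cons comp rest ih =>
    rw [List.foldl_cons]
    refine ih _ ?_ (fun x hx => hc x (List.mem_cons_of_mem _ hx))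
    intro x hx
    unfold pvNormStep at hx
    by_cases h1 : comp = [] ∨ comp = ['.']
    · rw [if_pos h1] at hx; exact hacc x hx
    · rw [if_neg h1] at hx
      by_cases h2 : comp ≠ ['.', '.'] ∨ (k = 0 ∧ acc = []) ∨ (acc ≠ [] ∧ acc.getLast? = some ['.', '.'])
      · rw [if_pos h2] at hx
        rcases List.mem_append.1 hx with h | h
        · exact hacc x h
        · have hxc : x = comp := by simpa using h
          subst hxc
          exact ⟨fun hn => h1 (Or.inl hn), hc _ List.mem_cons_self⟩
      · rw [if_neg h2] at hx
        by_cases h3 : acc ≠ []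
        · rw [if_pos h3] at hx; exact hacc x (List.dropLast_subset _ hx)
        · rw [if_neg h3] at hx; exact hacc x hx

-- normpath of a relative path is relative
theorem pv_normpath_not_abs (p : List Char) (hp : PySem.Chars.startswith p ['/'] = false) :
    PySem.Chars.startswith (pvNormpath p) ['/'] = false := by
  by_cases hnil : p = []
  · subst hnil; decide
  have hpn : ¬ PySem.Chars.startswith p ['/'] = true := by simp [hp]
  unfold pvNormpath
  rw [if_neg hnil, if_neg hpn]
  have hinv := pv_fold_inv 0 (PySem.Chars.splitOn p ['/']) []
    (by simp) (fun x hx => pv_splitOn_no_sep p x hx)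
  simp only [List.replicate_zero, List.nil_append]
  by_cases hj : PySem.Chars.join ['/'] ((PySem.Chars.splitOn p ['/']).foldl (pvNormStep 0) []) = []
  · rw [if_pos hj]; decide
  · rw [if_neg hj]
    cases hcomps : (PySem.Chars.splitOn p ['/']).foldl (pvNormStep 0) [] with
    | nil => decide
    | cons c rest =>
      have hc := hinv c (hcomps ▸ List.mem_cons_self)
      have hjoin : ∃ t, PySem.Chars.join ['/'] (c :: rest) = c ++ t := by
        cases rest with
        | nil => exact ⟨[], by rw [PySem.Chars.join_singleton]; simp⟩
        | cons d ds => exact ⟨_, by rw [PySem.Chars.join_cons_cons, List.append_assoc]⟩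
      obtain ⟨t, ht⟩ := hjoin
      rw [ht]
      cases hcc : c with
      | nil => exact absurd hcc hc.1
      | cons a as =>
        have ha : a ≠ '/' := fun h => hc.2 (hcc ▸ h ▸ List.mem_cons_self)
        rw [Bool.eq_false_iff]
        intro h
        rw [PySem.Chars.startswith_iff] at h
        exact ha (List.cons_prefix_cons.mp h).1.symm

-- A's component loop with one initial slash is B's stack loop
theorem pv_fold_eq (comps acc : List (List Char)) (hacc : ['.', '.'] ∉ acc) :
    comps.foldl (pvNormStep 1) acc = comps.foldl pvStackStep acc ∧
      ['.', '.'] ∉ comps.foldl pvStackStep acc := by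
  induction comps generalizing acc with
  | nil => exact ⟨rfl, hacc⟩
  | cons comp rest ih =>
    have hstep : pvNormStep 1 acc comp = pvStackStep acc comp ∧ ['.', '.'] ∉ pvStackStep acc comp := by
      unfold pvNormStep pvStackStep
      by_cases h1 : comp = [] ∨ comp = ['.']
      · have h3 : ¬ comp = ['.', '.'] := by rcases h1 with h | h <;> simp [h]
        have h2 : ¬ (comp ≠ [] ∧ comp ≠ ['.']) := by tauto
        rw [if_pos h1, if_neg h3, if_neg h2]
        exact ⟨rfl, hacc⟩
      · by_cases h3 : comp = ['.', '.']
        · have hcond : ¬ (comp ≠ ['.', '.'] ∨ (1 = 0 ∧ acc = []) ∨ (acc ≠ [] ∧ acc.getLast? = some ['.', '.'])) := by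
            rintro (h | ⟨h, -⟩ | ⟨-, hl⟩)
            · exact h h3
            · omega
            · exact hacc (List.mem_of_getLast? hl)
          rw [if_neg h1, if_neg hcond, if_pos h3]
          by_cases hae : acc = []
          · have hA : ¬ (acc ≠ []) := by simp [hae]
            rw [if_neg hA, if_pos hae]
            exact ⟨rfl, hacc⟩
          · rw [if_pos hae, if_neg hae]
            exact ⟨rfl, fun h => hacc (List.dropLast_subset _ h)⟩
        · have h2 : comp ≠ [] ∧ comp ≠ ['.'] := by tauto
          rw [if_neg h1, if_pos (Or.inl h3), if_neg h3, if_pos h2]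
          refine ⟨rfl, ?_⟩
          intro h
          rcases List.mem_append.1 h with h | h
          · exact hacc h
          · have hx : (['.', '.'] : List Char) = comp := by simpa using h
            exact h3 hx.symm
    rw [List.foldl_cons, List.foldl_cons, hstep.1]
    exact ih _ hstep.2

-- for an absolute path with at most one leading slash, normpath = '/' ++ B's joined stack
theorem pv_normpath_abs (p : List Char) (hp : PySem.Chars.startswith p ['/'] = true)
    (h2 : ¬ (PySem.Chars.startswith p ['/', '/'] = true ∧ PySem.Chars.startswith p ['/', '/', '/'] = false)) :
    pvNormpath p = '/' :: PySem.Chars.join ['/'] ((PySem.Chars.splitOn p ['/']).foldl pvStackStep []) := by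
  have hnil : p ≠ [] := by rintro rfl; simp [PySem.Chars.startswith] at hp
  have h2' : ¬ (PySem.Chars.startswith p ['/', '/'] = true ∧ ¬ PySem.Chars.startswith p ['/', '/', '/'] = true) := by
    rintro ⟨ha, hb⟩
    exact h2 ⟨ha, by simpa using hb⟩
  unfold pvNormpath
  rw [if_neg hnil, if_pos hp, if_neg h2']
  have hfold := (pv_fold_eq (PySem.Chars.splitOn p ['/']) [] (by simp)).1
  simp only [hfold, List.replicate_succ, List.replicate_zero, List.nil_append, List.cons_append]
  rw [if_neg (by simp)]

-- one step of the tail matcher, as an equation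
theorem pvReTail_cons (c : Char) (t : List Char) :
    pvReTail (c :: t)
      = (if pvPathClass.contains c then pvReTail t
        else if c = '?' then t.all (fun d => pvQueryClass.contains d) else false) := rfl

-- the tail matcher on a '?'-free block followed by a rest
theorem pv_reTail_append (ns rest : List Char) (hq : '?' ∉ ns) :
    pvReTail (ns ++ rest) = (ns.all (fun c => pvPathClass.contains c) && pvReTail rest) := by
  induction ns with
  | nil => simp
  | cons a t ih =>
    have ha : a ≠ '?' := fun h => hq (h ▸ List.mem_cons_self)
    have ht : '?' ∉ t := fun h => hq (List.mem_cons_of_mem _ h)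
    rw [List.cons_append, pvReTail_cons, List.all_cons]
    by_cases hc : pvPathClass.contains a = true
    · rw [if_pos hc, ih ht, hc, Bool.true_and]
    · have hcf : pvPathClass.contains a = false := by simpa using hc
      rw [if_neg hc, if_neg ha, hcf]
      simp

-- ===== VERDICT (by name: the statement is the Claim_ definition above) =====
theorem build_dispatch_path_py_spec : Claim_equal_build_dispatch_path_py := by
  intro r _ hpre
  unfold Pre_build_dispatch_path_py at hpre
  unfold Spec_build_dispatch_path_py build_dispatch_path_py build_dispatch_path_py_alt
  simp only []
  have hnoq : '?' ∉ (pyPartition r.toList '?').1 := pv_partition_no_sep _ _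
  have hfst := pv_partition_fst r.toList
  have hsep : (pyPartition r.toList '?').2.1 = [] ∧ (pyPartition r.toList '?').2.2 = [] ∨
      (pyPartition r.toList '?').2.1 = ['?'] := by
    induction r.toList with
    | nil => simp [pyPartition]
    | cons a t ih =>
      unfold pyPartition
      by_cases h : a = '?'
      · simp [h]
      · simpa [h] using ih
  generalize hP : pyPartition r.toList '?' = pq at hnoq hsep hfst
  obtain ⟨path_only, sep, query⟩ := pq
  simp only at hnoq hsep hfst ⊢
  have hpre' : ¬ (PySem.Chars.startswith path_only ['/', '/'] = true ∧
      PySem.Chars.startswith path_only ['/', '/', '/'] = false) := by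
    rw [hfst]; exact hpre
  have hchars := pv_normpath_chars path_only
  have hqn : '?' ∉ pvNormpath path_only := by
    intro hmem
    rcases hchars '?' hmem with h | h | h
    · exact absurd h (by decide)
    · exact absurd h (by decide)
    · exact hnoq h
  by_cases hswP : PySem.Chars.startswith path_only ['/'] = true
  · -- absolute path: B's stack normalizer computes exactly pvNormpath
    have hnorm := pv_normpath_abs path_only hswP hpre'
    have hsw : PySem.Chars.startswith (pvNormpath path_only) ['/'] = true := by
      rw [hnorm, PySem.Chars.startswith_iff]
      simp
    rw [if_neg (not_not_intro hsw), if_neg (not_not_intro hswP), ← hnorm]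
    obtain ⟨t0, ht0⟩ : ∃ t0, pvNormpath path_only = '/' :: t0 := by
      rw [PySem.Chars.startswith_iff] at hsw
      obtain ⟨t, ht⟩ := hsw
      exact ⟨t, ht.symm⟩
    set trailing := (if PySem.Chars.endswith path_only ['/'] ∧ pvNormpath path_only ≠ ['/'] then ['/'] else []) with htr
    have htrq : '?' ∉ t0 ++ trailing := by
      intro h
      rcases List.mem_append.1 h with h | h
      · exact hqn (ht0 ▸ List.mem_cons_of_mem _ h)
      · rcases htr ▸ h with h'
        split_ifs at h' <;> simp_all
    have hBif : (if PySem.Chars.endswith path_only ['/'] ∧ pvNormpath path_only ≠ ['/'] then pvNormpath path_only ++ ['/'] else pvNormpath path_only) = pvNormpath path_only ++ trailing := by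
      rw [htr]; split_ifs <;> simp
    rw [hBif]
    have hcand : pvNormpath path_only ++ trailing ++ sep ++ query
        = '/' :: (t0 ++ trailing ++ (sep ++ query)) := by
      rw [ht0]; simp
    have hmatch : pvReMatch (pvNormpath path_only ++ trailing ++ sep ++ query)
        = ((t0 ++ trailing).all (fun c => pvPathClass.contains c) && pvReTail (sep ++ query)) := by
      rw [hcand]
      show pvReTail (t0 ++ trailing ++ (sep ++ query)) = _
      exact pv_reTail_append _ _ htrq
    have htrall : trailing.all (fun c => pvPathClass.contains c) = true := by
      rw [htr]; split_ifs <;> decide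
    have hslash : pvPathClass.contains '/' = true := by decide
    have hallN : (pvNormpath path_only).all (fun c => pvPathClass.contains c)
        = ((t0 ++ trailing).all (fun c => pvPathClass.contains c)) := by
      rw [ht0]
      simp only [List.all_cons, List.all_append, hslash, Bool.true_and, htrall, Bool.and_true]
    rw [hmatch]
    by_cases hAp : (pvNormpath path_only).any (fun ch => ¬ PySem.Set.contains pvAllowedPathChars ch = true)
    · rw [if_pos hAp]
      have hfalse : (t0 ++ trailing).all (fun c => pvPathClass.contains c) = false := by
        rw [← hallN]
        rcases List.any_eq_true.1 hAp with ⟨c, hc, hbad⟩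
        refine List.all_eq_false.2 ⟨c, hc, ?_⟩
        simp only [decide_eq_true_eq] at hbad
        rw [← pv_path_char_eq]
        simpa using hbad
      rw [hfalse, Bool.false_and]
      simp
    · rw [if_neg hAp]
      have hallT : (t0 ++ trailing).all (fun c => pvPathClass.contains c) = true := by
        rw [← hallN]
        refine List.all_eq_true.2 fun c hc => ?_
        rw [← pv_path_char_eq]
        by_contra hbad
        exact hAp (List.any_eq_true.2 ⟨c, hc, by simpa using hbad⟩)
      rw [hallT, Bool.true_and]
      by_cases hAq : query ≠ [] ∧ query.any (fun ch => ¬ PySem.Set.contains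
          (PySem.Set.union pvAllowedPathChars ("=&+%@!$'()*,;:".toList)) ch) = true
      · rw [if_pos hAq]
        have hsepq : sep = ['?'] := by
          rcases hsep with ⟨hs, hq⟩ | hs
          · exact absurd hq hAq.1
          · exact hs
        have hqfalse : query.all (fun d => pvQueryClass.contains d) = false := by
          rcases List.any_eq_true.1 hAq.2 with ⟨c, hc, hbad⟩
          refine List.all_eq_false.2 ⟨c, hc, ?_⟩
          simp only [decide_eq_true_eq] at hbad
          rw [← pv_query_char_eq]
          simpa using hbad
        have hRf : pvReTail (sep ++ query) = false := by
          rw [hsepq]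
          show pvReTail ('?' :: query) = false
          rw [pvReTail_cons, if_neg (by decide), if_pos rfl, hqfalse]
        rw [hRf]
        simp
      · rw [if_neg hAq]
        have hRt : pvReTail (sep ++ query) = true := by
          rcases hsep with ⟨hs, hq⟩ | hs
          · rw [hs, hq]; rfl
          · rw [hs]
            show pvReTail ('?' :: query) = true
            rw [pvReTail_cons, if_neg (by decide), if_pos rfl]
            by_cases hqe : query = []
            · simp [hqe]
            · refine List.all_eq_true.2 fun c hc => ?_
              rw [← pv_query_char_eq]
              by_contra hbad
              exact hAq ⟨hqe, List.any_eq_true.2 ⟨c, hc, by simpa using hbad⟩⟩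
        rw [hRt]
        simp
  · -- relative path: A's normalized path is relative too, both reject
    have hswF : PySem.Chars.startswith path_only ['/'] = false := by simpa using hswP
    have hswN : ¬ PySem.Chars.startswith (pvNormpath path_only) ['/'] = true := by
      simp [pv_normpath_not_abs path_only hswF]
    rw [if_pos hswN, if_pos hswP]
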